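-- pv_equiv track=rewrite | github.com/kendrajmoore/tweet-generator | modules/histogram_benchmark.py | make_histogram
-- ===== SOURCE A (Python) =====
-- def make_histogram(words):
--     hgram = []                           # create a new list called hgram
--     for word in words:                   # for each word in the list of words
--         index = find(word, hgram)        # check if word is in hgram already
--         if index == None:                # if word is not in histogram
--             hgram.append((word, 1))      # add a new word-count pair to hgram
--         else:                            # if word is already in hgram
--             count = hgram[index][1]      # find its current count
--             new_pair = (word, count + 1) # make a new word-count pair
--             hgram[index] = new_pair      # replace word-count pair
--     return hgram
--
-- def find(item, hgram):
--     # look a the type, occuranes in a histogram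
--     for index, pair in enumerate(hgram):
--         # if I find a word/type
--         if pair[0] == item:
--             return index
--             #need to return the word type
--     return None
--
-- def count(word, hgram):
--     index = find(word, hgram)
--     if index:
--         word_count_pair = hgram[index]
--         return word_count_pair[1]
--     else:
--         return 0
-- ===== SOURCE B (Python) =====
-- def make_histogram(words):
--     words = list(words)
--     unique = list(dict.fromkeys(words))
--     return [(w, words.count(w)) for w in unique]
-- ===== Notes on version B (the rewrite author's own statement) =====
-- stated objective: idiomatic
-- what changed: Replaces the single incremental pass that searches and updates a growing pair-list with a dict.fromkeys dedup pass followed by a counting scan per distinct word.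
import Mathlib
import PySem

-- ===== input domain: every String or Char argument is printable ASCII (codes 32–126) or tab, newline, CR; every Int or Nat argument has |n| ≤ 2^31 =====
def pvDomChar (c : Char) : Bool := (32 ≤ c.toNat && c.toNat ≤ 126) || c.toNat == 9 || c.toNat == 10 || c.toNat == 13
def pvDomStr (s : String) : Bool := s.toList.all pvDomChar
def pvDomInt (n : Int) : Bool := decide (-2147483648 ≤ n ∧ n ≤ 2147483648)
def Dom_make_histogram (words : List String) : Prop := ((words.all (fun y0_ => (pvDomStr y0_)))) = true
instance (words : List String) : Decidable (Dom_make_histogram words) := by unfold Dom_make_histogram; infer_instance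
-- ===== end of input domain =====

-- B replaces A's incremental search-and-update pass over a growing pair-list by an
-- ordered dedup followed by a count per distinct word (idiomatic; same asymptotic cost).


-- ===== PORT A =====
-- find(item, hgram): first index whose pair's first component equals item, else None
def pvFind (item : String) (hgram : List (String × Int)) : Option Nat :=
  match hgram with
  | [] => none
  | p :: rest => if p.1 == item then some 0 else (pvFind item rest).map (· + 1)

-- the body of A's for-loop
def pvStep (hgram : List (String × Int)) (word : String) : List (String × Int) :=
  match pvFind word hgram with
  | none => hgram ++ [(word, 1)]
  | some index =>
    -- hgram[index]: index returned by find is always in range, getD default never read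
    let count := ((hgram[index]?).getD (word, 0)).2
    hgram.set index (word, count + 1)

def make_histogram (words : List String) : List (String × Int) :=
  words.foldl pvStep []

-- ===== PORT B =====
def make_histogram_alt (words : List String) : List (String × Int) :=
  (PySem.List.dedup words).map (fun w => (w, (words.count w : Int)))

-- ===== PRECONDITION & SPEC =====
def Spec_make_histogram (words : List String) (out : List (String × Int)) : Prop := out = make_histogram_alt words
instance (words : List String) (out : List (String × Int)) : Decidable (Spec_make_histogram words out) := by unfold Spec_make_histogram; infer_instance

-- ===== CLAIM =====
def Claim_equal_make_histogram : Prop := ∀ (words : List String), Dom_make_histogram words → Spec_make_histogram words (make_histogram words)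

-- ===== LEMMAS AND PROOFS =====

theorem pvFind_map_none (t : List String) (c : String → Int) (w : String) :
    pvFind w (t.map (fun x => (x, c x))) = none ↔ w ∉ t := by
  induction t with
  | nil => simp [pvFind]
  | cons a s ih =>
    by_cases h : a = w
    · subst h; simp [pvFind]
    · simp [pvFind, h, Option.map_eq_none_iff, ih, Ne.symm h]

theorem pvStep_map (l : List String) (hnd : l.Nodup) (c : String → Int) (w : String) :
    pvStep (l.map (fun x => (x, c x))) w =
      if w ∈ l then l.map (fun x => (x, c x + if x = w then 1 else 0))
      else l.map (fun x => (x, c x)) ++ [(w, 1)] := by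
  induction l with
  | nil => simp [pvStep, pvFind]
  | cons a t ih =>
    rcases List.nodup_cons.mp hnd with ⟨ha, hT⟩
    have ih' := ih hT
    by_cases haw : a = w
    · subst haw
      simp only [pvStep, pvFind, List.map_cons, beq_self_eq_true, if_pos, List.mem_cons, true_or,
        List.getElem?_cons_zero, Option.getD_some, List.set_cons_zero]
      congr 1
      exact (List.map_congr_left (fun x hx => by
        have : x ≠ a := fun h => ha (h ▸ hx); simp [this]))
    · have hbeq : (a == w) = false := by simp [haw]
      by_cases hmem : w ∈ t
      · rcases hfind : pvFind w (t.map (fun x => (x, c x))) with _ | i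
        · exact absurd ((pvFind_map_none t c w).mp hfind) (by simpa using hmem)
        · simp only [pvStep, hfind] at ih'
          rw [if_pos hmem] at ih'
          simp only [pvStep, pvFind, List.map_cons, hbeq, Bool.false_eq_true, if_false, hfind,
            Option.map_some, List.getElem?_cons_succ, List.set_cons_succ, List.mem_cons, hmem,
            or_true, if_true]
          rw [ih']
          simp [haw]
      · rcases hfind : pvFind w (t.map (fun x => (x, c x))) with _ | i
        · simp only [pvStep, hfind] at ih'
          rw [if_neg hmem] at ih'
          simp only [pvStep, pvFind, List.map_cons, hbeq, Bool.false_eq_true, if_false, hfind,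
            Option.map_none, List.mem_cons, if_neg (by tauto : ¬ (w = a ∨ w ∈ t))]
        · have : w ∉ t := hmem
          rw [← pvFind_map_none t c w] at this
          rw [hfind] at this
          exact absurd this (by simp)

theorem dedup_snoc (pre : List String) (w : String) :
    PySem.List.dedup (pre ++ [w]) =
      if w ∈ pre then PySem.List.dedup pre else PySem.List.dedup pre ++ [w] := by
  simp only [PySem.List.dedup_eq_ofList, PySem.Set.ofList_eq_foldl, List.foldl_append,
    List.foldl_cons, List.foldl_nil]
  rw [← PySem.Set.ofList_eq_foldl]
  simp [PySem.Set.add, PySem.Set.contains]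

theorem hist_eq (words : List String) :
    words.foldl pvStep [] =
      (PySem.List.dedup words).map (fun w => (w, (words.count w : Int))) := by
  induction words using List.reverseRecOn with
  | nil => simp [PySem.List.dedup]
  | append_singleton pre w ih =>
    rw [List.foldl_append, List.foldl_cons, List.foldl_nil, ih,
      pvStep_map _ (PySem.List.nodup_dedup pre) _ w, dedup_snoc]
    by_cases hmem : w ∈ pre
    · rw [if_pos (by simpa [PySem.List.mem_dedup] using hmem), if_pos hmem]
      refine List.map_congr_left (fun x hx => ?_)
      have : (pre ++ [w]).count x = pre.count x + if x = w then 1 else 0 := by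
        by_cases hxw : x = w
        · simp [hxw, List.count_append]
        · simp [hxw, Ne.symm hxw, List.count_append]
      rw [this]
      by_cases hxw : x = w
      · simp [hxw]
      · simp [hxw]
    · rw [if_neg (by simpa [PySem.List.mem_dedup] using hmem), if_neg hmem]
      rw [List.map_append]
      congr 1
      · refine List.map_congr_left (fun x hx => ?_)
        have hxw : x ≠ w := fun h => hmem (h ▸ (Iff.mp (PySem.List.mem_dedup pre x) hx))
        simp [List.count_append, Ne.symm hxw]
      · simp [List.count_append, List.count_eq_zero_of_not_mem hmem]

-- ===== VERDICT =====
theorem make_histogram_spec : Claim_equal_make_histogram := by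
  intro words _
  show make_histogram words = make_histogram_alt words
  exact hist_eq words
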